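-- pv_equiv track=rewrite | github.com/Strophox/CommandlineChess | terminal_chess.py | find_piece
-- ===== SOURCE A (Python) =====
-- def find_piece(color, board, piece_type, depth=1): #finds the king of a specific player on the board
--     for rank_num, rank in enumerate(board):
--         for file_num, square in enumerate(rank):
--             if square==color+'K':
--                 depth -= 1
--                 if not depth:
--                     return rank_num, file_num
--     return (-1,-1)
-- ===== SOURCE B (Python) =====
-- def find_piece(color, board, piece_type, depth=1):
--     # Skip whole ranks by their king-count, then select within the located rank.
--     if depth < 1:
--         return (-1, -1)
--     target = color + 'K'
--     k = depth
--     for rank_num, rank in enumerate(board):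
--         c = rank.count(target)
--         if k <= c:
--             files = [f for f, s in enumerate(rank) if s == target]
--             return (rank_num, files[k - 1])
--         k -= c
--     return (-1, -1)
-- ===== Notes on version B (the rewrite author's own statement) =====
-- stated objective: faster
-- what changed: A walks every square with a mutable countdown and early return; B first guards depth<1, then skips whole ranks by rank.count(target) and only in the rank containing the k-th match collects its file indices and picks the k-1st, doing the bulk of the scanning in C-level list.count instead of a per-square Python loop.
import Mathlib
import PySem

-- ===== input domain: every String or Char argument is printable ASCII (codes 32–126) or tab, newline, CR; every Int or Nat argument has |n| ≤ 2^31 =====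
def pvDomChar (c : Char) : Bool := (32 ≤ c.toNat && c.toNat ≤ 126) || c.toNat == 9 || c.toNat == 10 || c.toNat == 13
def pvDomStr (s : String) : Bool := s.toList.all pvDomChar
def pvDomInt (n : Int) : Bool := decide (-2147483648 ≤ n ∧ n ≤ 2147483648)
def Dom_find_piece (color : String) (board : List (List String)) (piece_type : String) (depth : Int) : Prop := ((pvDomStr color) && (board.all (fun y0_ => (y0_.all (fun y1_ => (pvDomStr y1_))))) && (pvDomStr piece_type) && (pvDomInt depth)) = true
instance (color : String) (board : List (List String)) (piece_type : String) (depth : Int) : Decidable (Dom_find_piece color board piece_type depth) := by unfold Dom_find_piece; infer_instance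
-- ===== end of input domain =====

-- B replaces A's per-square countdown scan with: guard depth<1, skip whole ranks by
-- rank.count(target), select the k-th file inside the located rank; objective: faster
-- (measured constant factor: the scanning is done by list.count, not a per-square loop).

-- ===== PORT A =====
-- inner 'for file_num, square in enumerate(rank)': either returns a position (.inl) or
-- falls through with the updated depth counter (.inr)
def pvGoRank (color : String) (rank_num : Int) : List String → Int → Int → Sum (Int × Int) Int
  | [], _, depth => .inr depth
  | square :: rest, file_num, depth =>
    if square == color ++ "K" then
      if depth - 1 = 0 then .inl (rank_num, file_num)
      else pvGoRank color rank_num rest (file_num + 1) (depth - 1)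
    else pvGoRank color rank_num rest (file_num + 1) depth

-- outer 'for rank_num, rank in enumerate(board)'
def pvGoBoard (color : String) : List (List String) → Int → Int → Int × Int
  | [], _, _ => (-1, -1)
  | rank :: rest, rank_num, depth =>
    match pvGoRank color rank_num rank 0 depth with
    | .inl p => p
    | .inr depth' => pvGoBoard color rest (rank_num + 1) depth'

def find_piece (color : String) (board : List (List String)) (piece_type : String) (depth : Int) : Int × Int :=
  pvGoBoard color board 0 depth

-- ===== PORT B =====
-- files = [f for f, s in enumerate(rank) if s == target]
def pvRowFiles (target : String) (rank : List String) : List Int :=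
  (PySem.List.enumerate rank 0).filterMap (fun q => if q.2 == target then some q.1 else none)

-- 'for rank_num, rank in enumerate(board): c = rank.count(target); if k <= c: … return; k -= c'
def pvAltLoop (target : String) : List (List String) → Int → Int → Int × Int
  | [], _, _ => (-1, -1)
  | rank :: rest, rank_num, k =>
    let c : Int := PySem.List.count rank target
    if k ≤ c then
      (rank_num, PySem.List.pyGetD (pvRowFiles target rank) (k - 1) (-1))  -- files[k-1]; in range since 1 ≤ k ≤ c
    else pvAltLoop target rest (rank_num + 1) (k - c)

def find_piece_alt (color : String) (board : List (List String)) (piece_type : String) (depth : Int) : Int × Int :=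
  if depth < 1 then (-1, -1)
  else pvAltLoop (color ++ "K") board 0 depth

-- ===== PRECONDITION & SPEC =====
def Spec_find_piece (color : String) (board : List (List String)) (piece_type : String) (depth : Int) (out : Int × Int) : Prop := out = find_piece_alt color board piece_type depth
instance (color : String) (board : List (List String)) (piece_type : String) (depth : Int) (out : Int × Int) : Decidable (Spec_find_piece color board piece_type depth out) := by unfold Spec_find_piece; infer_instance

-- ===== CLAIM (what is proved, stated in full; the proofs are below) =====
def Claim_equal_find_piece : Prop := ∀ (color : String) (board : List (List String)) (piece_type : String) (depth : Int), Dom_find_piece color board piece_type depth → Spec_find_piece color board piece_type depth (find_piece color board piece_type depth)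

-- ===== LEMMAS AND PROOFS =====

-- matches contributed by one rank, as A's inner loop walks it
def pvRowMs (color : String) (rank_num : Int) : List String → Int → List (Int × Int)
  | [], _ => []
  | square :: rest, file_num =>
    if square == color ++ "K" then (rank_num, file_num) :: pvRowMs color rank_num rest (file_num + 1)
    else pvRowMs color rank_num rest (file_num + 1)

-- matches of the whole board from a given starting rank number
def pvBoardMs (color : String) : List (List String) → Int → List (Int × Int)
  | [], _ => []
  | rank :: rest, rank_num => pvRowMs color rank_num rank 0 ++ pvBoardMs color rest (rank_num + 1)

def pvSelect (ms : List (Int × Int)) (depth : Int) : Int × Int :=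
  if 1 ≤ depth ∧ depth ≤ ms.length then ms.getD (depth - 1).toNat (-1, -1) else (-1, -1)

theorem pvGoRank_eq (color : String) (rank_num : Int) (rank : List String) :
    ∀ (file_num depth : Int),
      pvGoRank color rank_num rank file_num depth =
        (if 1 ≤ depth ∧ depth ≤ (pvRowMs color rank_num rank file_num).length then
          .inl ((pvRowMs color rank_num rank file_num).getD (depth - 1).toNat (-1, -1))
        else .inr (depth - (pvRowMs color rank_num rank file_num).length)) := by
  induction rank with
  | nil => intro fn d; simp [pvGoRank, pvRowMs]; omega
  | cons sq rest ih =>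
    intro fn d
    simp only [pvGoRank, pvRowMs]
    by_cases hsq : (sq == color ++ "K") = true
    · simp only [hsq, if_pos]
      by_cases hd : d - 1 = 0
      · have hd1 : d = 1 := by omega
        subst hd1
        rw [if_pos hd, if_pos ⟨le_refl _, by simp only [List.length_cons]; push_cast; omega⟩]
        rfl
      · rw [if_neg hd, ih]
        by_cases h1 : 1 ≤ d - 1 ∧ d - 1 ≤ ((pvRowMs color rank_num rest (fn + 1)).length : Int)
        · rw [if_pos h1, if_pos (by simp only [List.length_cons]; push_cast; omega)]
          have hidx : (d - 1).toNat = (d - 1 - 1).toNat + 1 := by omega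
          rw [hidx, List.getD_cons_succ]
        · rw [if_neg h1, if_neg (by simp only [List.length_cons]; push_cast; omega)]
          simp only [List.length_cons, Sum.inr.injEq]
          push_cast
          omega
    · simp only [hsq, Bool.false_eq_true, ite_false]
      exact ih (fn + 1) d

theorem pvGoBoard_eq (color : String) (board : List (List String)) :
    ∀ (rank_num depth : Int),
      pvGoBoard color board rank_num depth = pvSelect (pvBoardMs color board rank_num) depth := by
  induction board with
  | nil => intro rn d; simp [pvGoBoard, pvBoardMs, pvSelect]
  | cons rank rest ih =>
    intro rn d
    simp only [pvGoBoard, pvBoardMs]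
    rw [pvGoRank_eq]
    set ms1 := pvRowMs color rn rank 0 with hms1
    by_cases h1 : 1 ≤ d ∧ d ≤ (ms1.length : Int)
    · rw [if_pos h1]
      dsimp only
      simp only [pvSelect]
      rw [if_pos (by simp only [List.length_append]; push_cast; omega)]
      have hlt : (d - 1).toNat < ms1.length := by omega
      rw [List.getD_append _ _ _ _ hlt]
    · rw [if_neg h1]
      dsimp only
      rw [ih]
      simp only [pvSelect]
      by_cases h2 : 1 ≤ d - (ms1.length : Int) ∧ d - (ms1.length : Int) ≤ ((pvBoardMs color rest (rn + 1)).length : Int)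
      · rw [if_pos h2, if_pos (by simp only [List.length_append]; push_cast; omega)]
        have hge : ms1.length ≤ (d - 1).toNat := by omega
        rw [List.getD_append_right _ _ _ _ hge]
        congr 1
        omega
      · rw [if_neg h2, if_neg (by simp only [List.length_append]; push_cast; omega)]

-- A's per-rank match list is B's file list tagged with the rank number
theorem pvRowMs_eq_map (color : String) (rank_num : Int) (rank : List String) :
    ∀ (file_num : Int),
      pvRowMs color rank_num rank file_num =
        ((PySem.List.enumerate rank file_num).filterMap (fun q =>
          if q.2 == color ++ "K" then some q.1 else none)).map (fun f => (rank_num, f)) := by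
  induction rank with
  | nil => intro fn; simp [PySem.List.enumerate_nil, pvRowMs]
  | cons sq rest ih =>
    intro fn
    rw [PySem.List.enumerate_cons]
    simp only [pvRowMs]
    by_cases hsq : (sq == color ++ "K") = true
    · rw [List.filterMap_cons_some (b := fn) (by simp [hsq]), if_pos hsq, ih, List.map_cons]
    · rw [List.filterMap_cons_none (by simp [hsq]), if_neg hsq, ih]

-- rank.count(target) counts exactly the collected file indices
theorem pvCount_eq_len_files (target : String) (rank : List String) :
    ∀ (file_num : Int),
      PySem.List.count rank target =
        ((PySem.List.enumerate rank file_num).filterMap (fun q =>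
          if q.2 == target then some q.1 else none)).length := by
  induction rank with
  | nil => intro fn; simp [PySem.List.enumerate_nil, PySem.List.count]
  | cons sq rest ih =>
    intro fn
    rw [PySem.List.enumerate_cons]
    have ih' := ih (fn + 1)
    by_cases hsq : (sq == target) = true
    · rw [List.filterMap_cons_some (b := fn) (by simp [hsq]), List.length_cons]
      simp only [PySem.List.count, List.count_cons, hsq, if_true] at ih' ⊢
      omega
    · rw [List.filterMap_cons_none (by simp [hsq])]
      simp [PySem.List.count, List.count_cons, hsq] at ih' ⊢
      omega

theorem pvAltLoop_eq (color : String) (board : List (List String)) :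
    ∀ (rank_num k : Int), 1 ≤ k →
      pvAltLoop (color ++ "K") board rank_num k = pvSelect (pvBoardMs color board rank_num) k := by
  induction board with
  | nil => intro rn k hk; simp [pvAltLoop, pvBoardMs, pvSelect]
  | cons rank rest ih =>
    intro rn k hk
    simp only [pvAltLoop, pvBoardMs, pvSelect]
    have hrow := pvRowMs_eq_map color rn rank 0
    have hcnt := pvCount_eq_len_files (color ++ "K") rank 0
    set files := (PySem.List.enumerate rank 0).filterMap (fun q =>
      if q.2 == color ++ "K" then some q.1 else none) with hfiles
    have hlen1 : (pvRowMs color rn rank 0).length = files.length := by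
      rw [hrow, List.length_map]
    by_cases hle : k ≤ (PySem.List.count rank (color ++ "K") : Int)
    · have hlt : (k - 1).toNat < files.length := by rw [hcnt] at hle; omega
      rw [if_pos hle, if_pos (⟨hk, by simp only [List.length_append]; omega⟩)]
      rw [List.getD_append _ _ _ _ (by omega)]
      rw [hrow, List.getD_eq_getElem _ _ (by rw [List.length_map]; exact hlt), List.getElem_map]
      have hcast : k - 1 = (((k - 1).toNat : Nat) : Int) := by omega
      conv_lhs => rw [hcast, PySem.List.pyGetD_natCast]
      have hpv : pvRowFiles (color ++ "K") rank = files := rfl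
      rw [hpv, List.getD_eq_getElem _ _ hlt]
    · rw [if_neg hle]
      have hk' : 1 ≤ k - (PySem.List.count rank (color ++ "K") : Int) := by omega
      rw [ih (rn + 1) _ hk']
      simp only [pvSelect]
      have hlen : (pvRowMs color rn rank 0).length = PySem.List.count rank (color ++ "K") := by
        rw [hrow, List.length_map, ← hcnt]
      by_cases h2 : 1 ≤ k - (PySem.List.count rank (color ++ "K") : Int) ∧
          k - (PySem.List.count rank (color ++ "K") : Int) ≤ ((pvBoardMs color rest (rn + 1)).length : Int)
      · rw [if_pos h2, if_pos (by simp only [List.length_append]; push_cast; omega)]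
        have hge : (pvRowMs color rn rank 0).length ≤ (k - 1).toNat := by omega
        rw [List.getD_append_right _ _ _ _ hge]
        congr 1
        omega
      · rw [if_neg h2, if_neg (by simp only [List.length_append]; push_cast; omega)]

-- ===== VERDICT (by name: the statement is the Claim_ definition above) =====
theorem find_piece_spec : Claim_equal_find_piece := by
  intro color board piece_type depth _
  unfold Spec_find_piece find_piece find_piece_alt
  rw [pvGoBoard_eq]
  by_cases hd : depth < 1
  · rw [if_pos hd]
    simp only [pvSelect]
    rw [if_neg (by omega)]
  · rw [if_neg hd, pvAltLoop_eq color board 0 depth (by omega)]
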